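-- pv_equiv track=rewrite | github.com/aa694849243/leetcode_cj | 2201-2300/2234. 花园的最大总美丽值.py | maximumBeauty
-- ===== SOURCE A (Python) =====
-- import bisect
-- import itertools
-- from typing import List
--
-- def maximumBeauty(flowers: List[int], newFlowers: int, target: int, full: int, partial: int) -> int:
--     flowers.sort()
--     n = len(flowers)
--     idx = bisect.bisect_left(flowers, target)
--     ans = full * (n - idx)
--     if idx == 0:
--         return ans
--     flowers = flowers[:idx]
--     precums = [*itertools.accumulate(flowers)]
--     resi_flowers = [target - num for num in flowers]
--     resi_precums = [*itertools.accumulate(resi_flowers[::-1])]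
--     mi = min(flowers)
--
--     def calc(r, num, cost):
--         if l < len(flowers):  # 当l取不完整个序列时，尽可能多的拿完全花园的分数
--             # r = bisect.bisect_right(resi_precums[:len(flowers) - l], cost)  # 考虑到交叉情况
--             r = min(len(flowers) - l, r)
--             if r == 0:  # 完全花园分数一个都拿不到
--                 return num * partial
--             cost -= resi_precums[r - 1]
--             r_num = r + cost // (target - num)
--             if r_num >= len(flowers):  # 完全花园可以拿完整个序列时，需要比较是否需要不完全花园的分数
--                 r_num = len(flowers)
--                 return max(r_num * full, (r_num - 1) * full + partial * num)
--             else: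
--                 return num * partial + r_num * full
--         else:  # 当l取完整个序列时，则target-num为铺满一个所需要的耗费花数目
--             r_num = cost // (target - num)
--             if r_num >= len(flowers):
--                 r_num = len(flowers)
--                 return max(num * partial + (r_num - 1) * full, r_num * full)
--             else:
--                 return num * partial + r_num * full
--
--     res = ans
--     l = 0
--     r = bisect.bisect_right(resi_precums, newFlowers)  # 双指针
--     for num in range(mi, target):
--         while l < len(flowers) and flowers[l] <= num:  # l代表不完全花园的数目
--             l += 1
--         cost = newFlowers - l * num + precums[l - 1]
--         if cost < 0:
--             break
--         while r > 0 and resi_precums[r - 1] > cost:  # r代表完全花园的数目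
--             r -= 1
--         tmp = calc(r, num, cost)
--         if tmp != -1:
--             res = max(ans + tmp, res)
--     return res
-- ===== SOURCE B (Python) =====
-- import bisect
-- from itertools import accumulate
--
--
-- def maximumBeauty(flowers, newFlowers, target, full, partial):
--     fs = sorted(flowers)
--     n = len(fs)
--     idx = bisect.bisect_left(fs, target)
--     base = full * (n - idx)
--     if idx == 0:
--         return base
--     low = fs[:idx]
--     pre = list(accumulate(low))
--     suf = list(accumulate(target - x for x in reversed(low)))  # suf[j-1] = cost to complete the j highest
--
--     best = 0
--     for num in range(low[0], target):
--         l = bisect.bisect_right(low, num)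
--         b = newFlowers - l * num + pre[l - 1]  # budget left after raising all low gardens to num
--         if b < 0:
--             break
--         d = target - num
--         k0 = idx - l
--
--         def fill_cost(j):
--             # minimal cost to complete j gardens once every garden is at least num:
--             # the min(j, k0) gardens above num first, the rest from level num at d apiece
--             k = min(j, k0)
--             return (suf[k - 1] if k else 0) + (j - k) * d
--
--         lo, hi = 0, idx  # invariant: fill_cost(lo) <= b; binary search the largest such j in [0, idx]
--         while lo < hi:
--             mid = (lo + hi + 1) // 2
--             if fill_cost(mid) <= b:
--                 lo = mid
--             else:
--                 hi = mid - 1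
--         if lo == idx:
--             gain = max(idx * full, (idx - 1) * full + partial * num)
--         else:
--             gain = partial * num + lo * full
--         best = max(best, gain)
--     return base + best
-- ===== Notes on version B (the rewrite author's own statement) =====
-- stated objective: alternative
-- what changed: A's four-branch closure 'calc' fed by two incrementally maintained pointers (l advanced element-by-element, r walked down the residual prefix sums, plus a floordiv correction and a -1 sentinel) is replaced by one uniform mechanism: per candidate minimum, B binary-searches the largest affordable number of completed gardens on a single piecewise fill-cost curve, and the sentinel/branch logic collapses into one clamp.
import Mathlib
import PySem

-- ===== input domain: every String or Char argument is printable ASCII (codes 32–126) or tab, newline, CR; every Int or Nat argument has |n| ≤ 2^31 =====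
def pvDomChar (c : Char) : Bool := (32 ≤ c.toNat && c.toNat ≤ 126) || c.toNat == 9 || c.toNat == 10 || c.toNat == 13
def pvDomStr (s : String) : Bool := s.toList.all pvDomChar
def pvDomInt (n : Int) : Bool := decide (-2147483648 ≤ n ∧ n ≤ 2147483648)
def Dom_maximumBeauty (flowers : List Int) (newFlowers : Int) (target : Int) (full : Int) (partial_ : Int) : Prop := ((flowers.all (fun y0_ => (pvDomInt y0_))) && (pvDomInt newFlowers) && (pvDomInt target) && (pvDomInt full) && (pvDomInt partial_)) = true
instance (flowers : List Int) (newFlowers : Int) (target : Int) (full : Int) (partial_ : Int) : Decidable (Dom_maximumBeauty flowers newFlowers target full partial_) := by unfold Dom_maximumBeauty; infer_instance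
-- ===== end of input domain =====

-- B replaces A's two-pointer sweep with its four-branch closure by, per candidate minimum, a binary
-- search for the largest affordable garden count on one unified fill-cost curve; objective "alternative".
-- Note: Python A sorts the caller's list in place; the equivalence proved here is about the return value only.

-- itertools.accumulate (running sums, same length) — shared stdlib helper for both ports; exact.
def pyAccumFrom (acc : Int) : List Int → List Int
  | [] => []
  | x :: xs => (acc + x) :: pyAccumFrom (acc + x) xs

def pyAccum (xs : List Int) : List Int := pyAccumFrom 0 xs

-- ===== PORT A =====

-- 'while l < len(flowers) and flowers[l] <= num: l += 1'
def advanceL (fs : List Int) (num : Int) (l : Nat) : Nat :=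
  if h : l < fs.length ∧ fs.getD l 0 ≤ num then advanceL fs num (l + 1) else l
termination_by fs.length - l
decreasing_by omega

-- 'while r > 0 and resi_precums[r - 1] > cost: r -= 1'
def decreaseR (rp : List Int) (cost : Int) : Nat → Nat
  | 0 => 0
  | r + 1 => if cost < rp.getD r 0 then decreaseR rp cost r else r + 1

-- the nested 'def calc(r, num, cost)' (the closure variable l becomes a parameter)
def calcA (fs rp : List Int) (target full partial_ : Int) (l r : Nat) (num cost : Int) : Int :=
  if l < fs.length then
    let r := min (fs.length - l) r
    if r = 0 then num * partial_
    else
      let cost := cost - rp.getD (r - 1) 0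
      let r_num : Int := (r : Int) + PySem.Int.floordiv cost (target - num)
      if r_num ≥ (fs.length : Int) then
        let r_num : Int := (fs.length : Int)
        max (r_num * full) ((r_num - 1) * full + partial_ * num)
      else num * partial_ + r_num * full
  else
    let r_num : Int := PySem.Int.floordiv cost (target - num)
    if r_num ≥ (fs.length : Int) then
      let r_num : Int := (fs.length : Int)
      max (num * partial_ + (r_num - 1) * full) (r_num * full)
    else num * partial_ + r_num * full

-- 'for num in range(mi, target): …' carrying (l, r, res); 'break' returns res
-- (range is iterated lazily: fuel = number of remaining iterations, num the current value)
def loopA (fs pre rp : List Int) (newFlowers target full partial_ ans : Int) :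
    Nat → Int → Nat → Nat → Int → Int
  | 0, _, _, _, res => res
  | fuel + 1, num, l, r, res =>
      let l := advanceL fs num l
      let cost := newFlowers - (l : Int) * num + pre.getD (l - 1) 0   -- precums[l-1]; l ≥ 1 whenever reached (num ≥ min)
      if cost < 0 then res
      else
        let r := decreaseR rp cost r
        let tmp := calcA fs rp target full partial_ l r num cost
        let res := if tmp ≠ -1 then max (ans + tmp) res else res
        loopA fs pre rp newFlowers target full partial_ ans fuel (num + 1) l r res

def maximumBeauty (flowers : List Int) (newFlowers : Int) (target : Int) (full : Int) (partial_ : Int) : Int :=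
  let fl := PySem.List.sorted flowers (fun x => x)          -- flowers.sort()
  let n := fl.length
  let idx := PySem.List.bisectLeft fl target
  let ans := full * ((n : Int) - (idx : Int))
  if idx = 0 then ans
  else
    let fs := fl.take idx                                   -- flowers[:idx] (0 ≤ idx: slice = take, exact)
    let pre := pyAccum fs
    let resi := fs.map (fun x => target - x)
    let rp := pyAccum resi.reverse                          -- accumulate(resi_flowers[::-1]); [::-1] = reverse, exact
    let mi := (PySem.List.min? fs (fun x => x)).getD 0      -- min(flowers); fs ≠ [] here
    let r0 := PySem.List.bisectRight rp newFlowers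
    loopA fs pre rp newFlowers target full partial_ ans (target - mi).toNat mi 0 r0 ans

-- ===== PORT B =====

-- Source B's nested 'fill_cost(j)': minimal cost to complete j gardens once every garden is ≥ num
def fillCost (rp : List Int) (k0 : Nat) (d : Int) (j : Nat) : Int :=
  let k := min j k0
  (if k = 0 then 0 else rp.getD (k - 1) 0) + ((j : Int) - (k : Int)) * d

-- Source B's 'while lo < hi' binary search for the largest j in [lo, hi] with fill_cost(j) <= b
def bsearch (rp : List Int) (k0 : Nat) (d b : Int) (lo hi : Nat) : Nat :=
  if _h : lo < hi then
    let mid := (lo + hi + 1) / 2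
    if fillCost rp k0 d mid ≤ b then bsearch rp k0 d b mid hi
    else bsearch rp k0 d b lo (mid - 1)
  else lo
termination_by hi - lo
decreasing_by all_goals omega

-- Source B's candidate loop: per num, fresh bisect for l, budget, binary-searched garden count, one clamp
-- (same lazy range convention: fuel = remaining iterations, num the current value)
def loopB (fs pre rp : List Int) (idx : Nat) (nF t fu pa : Int) : Nat → Int → Int → Int
  | 0, _, best => best
  | fuel + 1, num, best =>
      let l := PySem.List.bisectRight fs num
      let b := nF - (l : Int) * num + pre.getD (l - 1) 0    -- pre[l-1]; l ≥ 1 since num ≥ low[0]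
      if b < 0 then best
      else
        let d := t - num
        let k0 := idx - l
        let j := bsearch rp k0 d b 0 idx
        let g := if j = idx then max ((idx : Int) * fu) (((idx : Int) - 1) * fu + pa * num)
                 else pa * num + (j : Int) * fu
        loopB fs pre rp idx nF t fu pa fuel (num + 1) (max best g)

def maximumBeauty_alt (flowers : List Int) (newFlowers : Int) (target : Int) (full : Int) (partial_ : Int) : Int :=
  let fl := PySem.List.sorted flowers (fun x => x)          -- sorted(flowers)
  let n := fl.length
  let idx := PySem.List.bisectLeft fl target
  let base := full * ((n : Int) - (idx : Int))
  if idx = 0 then base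
  else
    let fs := fl.take idx                                   -- fs[:idx]
    let pre := pyAccum fs
    let rp := pyAccum ((fs.map (fun x => target - x)).reverse)
    base + loopB fs pre rp idx newFlowers target full partial_
      (target - fs.headD 0).toNat (fs.headD 0) 0            -- low[0] on the nonempty prefix

-- ===== PRECONDITION & SPEC =====
def Spec_maximumBeauty (flowers : List Int) (newFlowers : Int) (target : Int) (full : Int) (partial_ : Int) (out : Int) : Prop := out = maximumBeauty_alt flowers newFlowers target full partial_
instance (flowers : List Int) (newFlowers : Int) (target : Int) (full : Int) (partial_ : Int) (out : Int) : Decidable (Spec_maximumBeauty flowers newFlowers target full partial_ out) := by unfold Spec_maximumBeauty; infer_instance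

-- ===== CLAIM (what is proved, stated in full; the proofs are below) =====
def Claim_equal_maximumBeauty : Prop := ∀ (flowers : List Int) (newFlowers : Int) (target : Int) (full : Int) (partial_ : Int), Dom_maximumBeauty flowers newFlowers target full partial_ → Spec_maximumBeauty flowers newFlowers target full partial_ (maximumBeauty flowers newFlowers target full partial_)

-- ===== LEMMAS AND PROOFS =====

-- bisect_right is monotone in the needle on a sorted list
theorem bR_mono (xs : List Int) (hs : xs.Pairwise (· ≤ ·)) {a b : Int} (hab : a ≤ b) :
    PySem.List.bisectRight xs a ≤ PySem.List.bisectRight xs b := by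
  by_contra h
  have h' : PySem.List.bisectRight xs b < PySem.List.bisectRight xs a := by omega
  obtain ⟨hb1, hb2, hb3⟩ := PySem.List.bisectRight_spec xs b hs
  obtain ⟨ha1, ha2, ha3⟩ := PySem.List.bisectRight_spec xs a hs
  have hj : PySem.List.bisectRight xs b < xs.length := lt_of_lt_of_le h' ha1
  have h1 := ha2 _ hj h'
  have h2 := hb3 _ hj (le_refl _)
  omega

theorem bR_pos (xs : List Int) (hs : xs.Pairwise (· ≤ ·)) (hne : xs ≠ []) (x : Int)
    (hx : xs.headD 0 ≤ x) : 1 ≤ PySem.List.bisectRight xs x := by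
  obtain ⟨m, tl, rfl⟩ := List.exists_cons_of_ne_nil hne
  obtain ⟨h1, h2, h3⟩ := PySem.List.bisectRight_spec (m :: tl) x hs
  by_contra h
  have h0 : (0 : Nat) < (m :: tl).length := by simp
  have := h3 0 h0 (by omega)
  simp at this hx
  omega

-- A's l-advancing while loop lands exactly on bisect_right
theorem advanceL_eq (fs : List Int) (num : Int) (hs : fs.Pairwise (· ≤ ·)) :
    ∀ (d l : Nat), l ≤ PySem.List.bisectRight fs num → PySem.List.bisectRight fs num - l = d →
      advanceL fs num l = PySem.List.bisectRight fs num := by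
  obtain ⟨h1, h2, h3⟩ := PySem.List.bisectRight_spec fs num hs
  intro d
  induction d with
  | zero =>
    intro l hl hd
    rw [advanceL]
    have hcond : ¬(l < fs.length ∧ fs.getD l 0 ≤ num) := by
      rintro ⟨hlen, hle⟩
      have hnum := h3 l hlen (by omega)
      rw [List.getD_eq_getElem fs 0 hlen] at hle
      omega
    rw [dif_neg hcond]
    omega
  | succ d ih =>
    intro l hl hd
    have hlt : l < PySem.List.bisectRight fs num := by omega
    have hlen : l < fs.length := by omega
    have hle : fs.getD l 0 ≤ num := by
      rw [List.getD_eq_getElem fs 0 hlen]; exact h2 l hlen hlt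
    rw [advanceL, dif_pos ⟨hlen, hle⟩]
    exact ih (l + 1) (by omega) (by omega)

-- A's r-decreasing while loop lands exactly on bisect_right
theorem decreaseR_eq (rp : List Int) (cost : Int) (hs : rp.Pairwise (· ≤ ·)) :
    ∀ r : Nat, PySem.List.bisectRight rp cost ≤ r → r ≤ rp.length →
      decreaseR rp cost r = PySem.List.bisectRight rp cost := by
  obtain ⟨h1, h2, h3⟩ := PySem.List.bisectRight_spec rp cost hs
  intro r
  induction r with
  | zero => intro hb _; simp only [decreaseR]; omega
  | succ r ih =>
    intro hb hlen
    by_cases hc : PySem.List.bisectRight rp cost ≤ r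
    · have hrlen : r < rp.length := by omega
      have hgt : cost < rp.getD r 0 := by
        rw [List.getD_eq_getElem rp 0 hrlen]; exact h3 r hrlen hc
      simp only [decreaseR, if_pos hgt]
      exact ih hc (by omega)
    · have hrlen : r < rp.length := by omega
      have hle : rp.getD r 0 ≤ cost := by
        rw [List.getD_eq_getElem rp 0 hrlen]; exact h2 r hrlen (by omega)
      simp only [decreaseR, if_neg (by omega : ¬ cost < rp.getD r 0)]
      omega

theorem length_pyAccumFrom (xs : List Int) : ∀ a : Int, (pyAccumFrom a xs).length = xs.length := by
  induction xs with
  | nil => intro a; rfl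
  | cons x t ih => intro a; simp [pyAccumFrom, ih]

theorem length_pyAccum (xs : List Int) : (pyAccum xs).length = xs.length :=
  length_pyAccumFrom xs 0

theorem pyAccumFrom_getD (xs : List Int) : ∀ (a : Int) (k : Nat), k < xs.length →
    (pyAccumFrom a xs).getD k 0 = a + (xs.take (k + 1)).sum := by
  induction xs with
  | nil => intro a k h; simp at h
  | cons x t ih =>
    intro a k h
    cases k with
    | zero => simp [pyAccumFrom]
    | succ k =>
      simp only [pyAccumFrom, List.getD_cons_succ, List.take_succ_cons, List.sum_cons]
      rw [ih (a + x) k (by simpa using h)]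
      omega

theorem pyAccum_getD (xs : List Int) (k : Nat) (h : k < xs.length) :
    (pyAccum xs).getD k 0 = (xs.take (k + 1)).sum := by
  have := pyAccumFrom_getD xs 0 k h
  simpa [pyAccum] using this

theorem pyAccumFrom_le (xs : List Int) (hx : ∀ x ∈ xs, 0 ≤ x) :
    ∀ (a y : Int), y ∈ pyAccumFrom a xs → a ≤ y := by
  induction xs with
  | nil => intro a y h; simp [pyAccumFrom] at h
  | cons x t ih =>
    intro a y h
    have hx0 : 0 ≤ x := hx x (by simp)
    simp only [pyAccumFrom, List.mem_cons] at h
    rcases h with rfl | h'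
    · omega
    · have := ih (fun z hz => hx z (by simp [hz])) (a + x) y h'
      omega

theorem pyAccumFrom_pairwise (xs : List Int) (hx : ∀ x ∈ xs, 0 ≤ x) :
    ∀ a : Int, (pyAccumFrom a xs).Pairwise (· ≤ ·) := by
  induction xs with
  | nil => intro a; simp [pyAccumFrom]
  | cons x t ih =>
    intro a
    simp only [pyAccumFrom]
    refine List.Pairwise.cons ?_ (ih (fun z hz => hx z (by simp [hz])) (a + x))
    intro y hy
    exact pyAccumFrom_le t (fun z hz => hx z (by simp [hz])) (a + x) y hy

theorem pyAccum_pairwise (xs : List Int) (hx : ∀ x ∈ xs, 0 ≤ x) :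
    (pyAccum xs).Pairwise (· ≤ ·) := pyAccumFrom_pairwise xs hx 0

-- the increment of the running-sum list is the underlying element
theorem pyAccum_inc (xs : List Int) (j : Nat) (hj : j < xs.length) :
    (pyAccum xs).getD j 0 - (if j = 0 then 0 else (pyAccum xs).getD (j - 1) 0)
      = xs.getD j 0 := by
  cases j with
  | zero =>
    rw [pyAccum_getD xs 0 hj, List.sum_take_succ xs 0 hj, List.getD_eq_getElem xs 0 hj]
    simp
  | succ j =>
    rw [pyAccum_getD xs (j + 1) hj, if_neg (by omega)]
    rw [Nat.add_sub_cancel, pyAccum_getD xs j (by omega)]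
    rw [List.sum_take_succ xs (j + 1) hj, List.getD_eq_getElem xs 0 hj]
    ring

theorem sum_map_sub (x : Int) (xs : List Int) :
    (xs.map (fun y => x - y)).sum = (xs.length : Int) * x - xs.sum := by
  induction xs with
  | nil => simp
  | cons y t ih =>
    simp only [List.map_cons, List.sum_cons, ih, List.length_cons]
    push_cast
    ring

-- the cost expression both ports compute at candidate num (with l = bisect_right fs num)
def costFv (fs : List Int) (nF num : Int) : Int :=
  nF - ((PySem.List.bisectRight fs num : Nat) : Int) * num
    + (pyAccum fs).getD (PySem.List.bisectRight fs num - 1) 0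

theorem costFv_repr (fs : List Int) (hs : fs.Pairwise (· ≤ ·)) (hne : fs ≠ [])
    (nF num : Int) (hmi : fs.headD 0 ≤ num) :
    costFv fs nF num = nF - (fs.map (fun y => max 0 (num - y))).sum := by
  obtain ⟨h1, h2, h3⟩ := PySem.List.bisectRight_spec fs num hs
  have hc1 : 1 ≤ PySem.List.bisectRight fs num := bR_pos fs hs hne num hmi
  set c := PySem.List.bisectRight fs num with hc
  have hget : (pyAccum fs).getD (c - 1) 0 = (fs.take c).sum := by
    have hcc : c - 1 + 1 = c := by omega
    rw [pyAccum_getD fs (c - 1) (by omega), hcc]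
  have hlen_take : (fs.take c).length = c := by
    rw [List.length_take]; omega
  have hta : ∀ y ∈ fs.take c, y ≤ num := by
    intro y hy
    obtain ⟨i, hi, rfl⟩ := List.getElem_of_mem hy
    have hi' : i < c := by
      have := hi; rw [hlen_take] at this; omega
    have hilen : i < fs.length := by omega
    have hgt : (fs.take c)[i] = fs[i] := List.getElem_take
    rw [hgt]
    exact h2 i hilen hi'
  have hdr : ∀ y ∈ fs.drop c, num < y := by
    intro y hy
    obtain ⟨i, hi, rfl⟩ := List.getElem_of_mem hy
    rw [List.getElem_drop]
    exact h3 (c + i) (by rw [List.length_drop] at hi; omega) (by omega)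
  have hsplit : (fs.map (fun y => max 0 (num - y))).sum
      = ((fs.take c).map (fun y => max 0 (num - y))).sum
        + ((fs.drop c).map (fun y => max 0 (num - y))).sum := by
    conv_lhs => rw [← List.take_append_drop c fs]
    rw [List.map_append, List.sum_append]
  have htake : ((fs.take c).map (fun y => max 0 (num - y))).sum
      = ((fs.take c).map (fun y => num - y)).sum := by
    congr 1
    apply List.map_congr_left
    intro y hy
    have := hta y hy
    omega
  have hdrop : ((fs.drop c).map (fun y => max 0 (num - y))).sum = 0 := by
    apply List.sum_eq_zero
    intro z hz
    obtain ⟨y, hy, rfl⟩ := List.mem_map.mp hz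
    have := hdr y hy
    omega
  have hsub := sum_map_sub num (fs.take c)
  rw [hlen_take] at hsub
  unfold costFv
  rw [← hc, hget, hsplit, htake, hdrop, hsub]
  ring

theorem costFv_le (fs : List Int) (hs : fs.Pairwise (· ≤ ·)) (hne : fs ≠ [])
    (nF num : Int) (hmi : fs.headD 0 ≤ num) : costFv fs nF num ≤ nF := by
  rw [costFv_repr fs hs hne nF num hmi]
  have : 0 ≤ (fs.map (fun y => max 0 (num - y))).sum := by
    apply List.sum_nonneg
    intro z hz
    obtain ⟨y, hy, rfl⟩ := List.mem_map.mp hz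
    exact le_max_left _ _
  omega

theorem costFv_anti (fs : List Int) (hs : fs.Pairwise (· ≤ ·)) (hne : fs ≠ [])
    (nF : Int) {a b : Int} (ha : fs.headD 0 ≤ a) (hab : a ≤ b) :
    costFv fs nF b ≤ costFv fs nF a := by
  rw [costFv_repr fs hs hne nF a ha, costFv_repr fs hs hne nF b (le_trans ha hab)]
  have : (fs.map (fun y => max 0 (a - y))).sum ≤ (fs.map (fun y => max 0 (b - y))).sum := by
    apply List.sum_le_sum
    intro y hy
    exact max_le_max (le_refl 0) (by omega)
  omega

-- A's guarded update ('if tmp != -1: res = max(ans+tmp, res)') is a plain max, given ans ≤ res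
theorem upd_eq (ans res t0 : Int) (hres : ans ≤ res) :
    (if t0 ≠ -1 then max (ans + t0) res else res) = max res (ans + t0) := by
  by_cases h : t0 = -1
  · subst h
    rw [if_neg (by simp)]
    exact (max_eq_left (by omega)).symm
  · rw [if_pos h]
    exact max_comm _ _

-- min(fs) of a sorted nonempty list is its head
theorem min?_sorted_headD (fs : List Int) (hs : fs.Pairwise (· ≤ ·)) (hne : fs ≠ []) :
    ((PySem.List.min? fs (fun x => x)).getD 0 : Int) = fs.headD 0 := by
  obtain ⟨m, tl, rfl⟩ := List.exists_cons_of_ne_nil hne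
  have hv : PySem.List.min? (m :: tl) (fun x => x) = some (tl.foldl min m) :=
    PySem.List.min?_id_cons m tl
  have hvm : tl.foldl min m ∈ m :: tl := PySem.List.min?_mem hv
  have hmin : ∀ y ∈ m :: tl, tl.foldl min m ≤ y := PySem.List.min?_isMin hv
  have h1 : tl.foldl min m ≤ m := hmin m (by simp)
  have h2 : m ≤ tl.foldl min m := by
    rcases List.mem_cons.mp hvm with hv' | hv'
    · omega
    · exact (List.pairwise_cons.mp hs).1 _ hv'
  rw [hv]
  simp
  omega

-- fill-cost curve: single-step value
theorem fillCost_zero (rp : List Int) (k0 : Nat) (d : Int) : fillCost rp k0 d 0 = 0 := by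
  simp [fillCost]

theorem fillCost_step (rp : List Int) (k0 : Nat) (d : Int) (j : Nat) :
    fillCost rp k0 d (j + 1)
      = fillCost rp k0 d j
        + (if j < k0 then rp.getD j 0 - (if j = 0 then 0 else rp.getD (j - 1) 0) else d) := by
  by_cases h : j < k0
  · have h1 : min (j + 1) k0 = j + 1 := by omega
    have h2 : min j k0 = j := by omega
    simp only [fillCost, h1, h2, if_pos h]
    by_cases h0 : j = 0
    · subst h0; simp
    · rw [if_neg h0]
      simp only [Nat.add_sub_cancel]
      push_cast
      ring
  · have h1 : min (j + 1) k0 = k0 := by omega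
    have h2 : min j k0 = k0 := by omega
    simp only [fillCost, h1, h2, if_neg h]
    push_cast
    ring

-- fill-cost is monotone when the prefix sums climb and d ≥ 1
theorem fillCost_mono (rp : List Int) (k0 : Nat) (d : Int) (N : Nat)
    (hd : 1 ≤ d)
    (hnn : ∀ j : Nat, j < k0 → 0 ≤ rp.getD j 0 - (if j = 0 then 0 else rp.getD (j - 1) 0)) :
    ∀ i j : Nat, i ≤ j → j ≤ N → fillCost rp k0 d i ≤ fillCost rp k0 d j := by
  have hstep : ∀ j : Nat, j < N → fillCost rp k0 d j ≤ fillCost rp k0 d (j + 1) := by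
    intro j hj
    rw [fillCost_step]
    by_cases h : j < k0
    · have := hnn j h; rw [if_pos h]; omega
    · rw [if_neg h]; omega
  intro i j
  induction j with
  | zero =>
    intro hij hjN
    have : i = 0 := by omega
    subst this
    exact le_refl _
  | succ j ih =>
    intro hij hjN
    by_cases h : i = j + 1
    · subst h; exact le_refl _
    · exact le_trans (ih (by omega) (by omega)) (hstep j (by omega))

-- the binary search returns a point where the affordability flips
theorem bsearch_props (rp : List Int) (k0 : Nat) (d b : Int) :
    ∀ (fuel lo hi : Nat), hi - lo ≤ fuel → lo ≤ hi → fillCost rp k0 d lo ≤ b →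
      lo ≤ bsearch rp k0 d b lo hi ∧ bsearch rp k0 d b lo hi ≤ hi ∧
      fillCost rp k0 d (bsearch rp k0 d b lo hi) ≤ b ∧
      (bsearch rp k0 d b lo hi < hi → b < fillCost rp k0 d (bsearch rp k0 d b lo hi + 1)) := by
  intro fuel
  induction fuel with
  | zero =>
    intro lo hi hf hle hfill
    have : lo = hi := by omega
    subst this
    rw [bsearch, dif_neg (by omega)]
    exact ⟨le_refl _, by omega, hfill, by intro hlt; omega⟩
  | succ f ih =>
    intro lo hi hf hle hfill
    by_cases h : lo < hi
    · rw [bsearch, dif_pos h]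
      have hmid1 : lo + 1 ≤ (lo + hi + 1) / 2 := by omega
      have hmid2 : (lo + hi + 1) / 2 ≤ hi := by omega
      by_cases hc : fillCost rp k0 d ((lo + hi + 1) / 2) ≤ b
      · rw [if_pos hc]
        obtain ⟨p1, p2, p3, p4⟩ := ih ((lo + hi + 1) / 2) hi (by omega) (by omega) hc
        exact ⟨by omega, p2, p3, p4⟩
      · rw [if_neg hc]
        obtain ⟨p1, p2, p3, p4⟩ := ih lo ((lo + hi + 1) / 2 - 1) (by omega) (by omega) hfill
        refine ⟨p1, by omega, p3, ?_⟩
        intro hlt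
        by_cases he : bsearch rp k0 d b lo ((lo + hi + 1) / 2 - 1) < (lo + hi + 1) / 2 - 1
        · exact p4 he
        · have : bsearch rp k0 d b lo ((lo + hi + 1) / 2 - 1) + 1 = (lo + hi + 1) / 2 := by omega
          rw [this]
          omega
    · rw [bsearch, dif_neg h]
      exact ⟨le_refl _, by omega, hfill, by intro hlt; omega⟩

-- the flip point of a monotone curve is unique
theorem flip_unique (f : Nat → Int) (b : Int) (N : Nat)
    (hmono : ∀ i j : Nat, i ≤ j → j ≤ N → f i ≤ f j)
    (j j' : Nat) (hj : j ≤ N) (hj' : j' ≤ N)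
    (h1 : f j ≤ b) (h2 : j < N → b < f (j + 1))
    (h1' : f j' ≤ b) (h2' : j' < N → b < f (j' + 1)) : j = j' := by
  rcases lt_trichotomy j j' with h | h | h
  · have := h2 (by omega)
    have := hmono (j + 1) j' (by omega) hj'
    omega
  · exact h
  · have := h2' (by omega)
    have := hmono (j' + 1) j (by omega) hj
    omega

-- closed forms of the fill-cost curve on its two linear pieces
theorem fillCost_eq_left (rp : List Int) (k0 : Nat) (d : Int) (j : Nat)
    (h1 : 1 ≤ j) (h2 : j ≤ k0) : fillCost rp k0 d j = rp.getD (j - 1) 0 := by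
  have hm : min j k0 = j := by omega
  simp only [fillCost, hm]
  rw [if_neg (by omega : ¬ j = 0)]
  ring

theorem fillCost_eq_right (rp : List Int) (k0 : Nat) (d : Int) (j : Nat)
    (h1 : 1 ≤ k0) (h2 : k0 ≤ j) :
    fillCost rp k0 d j = rp.getD (k0 - 1) 0 + ((j : Int) - (k0 : Int)) * d := by
  have hm : min j k0 = k0 := by omega
  simp only [fillCost, hm]
  rw [if_neg (by omega : ¬ k0 = 0)]

theorem fillCost_k0_zero (rp : List Int) (d : Int) (j : Nat) :
    fillCost rp 0 d j = (j : Int) * d := by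
  simp [fillCost]

-- THE CRUX: A's 'calc' (fed the bisect value of its r-pointer) computes exactly B's
-- binary-searched gain, for any budget ≥ 0 and any cut 1 ≤ l ≤ |fs|
theorem calc_eq_gain (fs rp : List Int) (t fu pa num cost : Int) (l : Nat)
    (hrs : rp.Pairwise (· ≤ ·)) (hrlen : rp.length = fs.length)
    (hnn : ∀ x ∈ rp, 0 ≤ x)
    (hl1 : 1 ≤ l) (hlidx : l ≤ fs.length)
    (hd : 1 ≤ t - num) (hcost : 0 ≤ cost)
    (hinc : ∀ j : Nat, j < fs.length - l →
        rp.getD j 0 - (if j = 0 then 0 else rp.getD (j - 1) 0) < t - num) :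
    calcA fs rp t fu pa l (PySem.List.bisectRight rp cost) num cost
      = (if bsearch rp (fs.length - l) (t - num) cost 0 fs.length = fs.length
         then max ((fs.length : Int) * fu) (((fs.length : Int) - 1) * fu + pa * num)
         else pa * num
              + ((bsearch rp (fs.length - l) (t - num) cost 0 fs.length : Nat) : Int) * fu) := by
  have hd0 : (0 : Int) < t - num := by omega
  have hnn' : ∀ j : Nat, j < fs.length - l →
      0 ≤ rp.getD j 0 - (if j = 0 then 0 else rp.getD (j - 1) 0) := by
    intro j hj
    have hjlen : j < rp.length := by omega
    by_cases h0 : j = 0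
    · subst h0
      rw [if_pos rfl, List.getD_eq_getElem rp 0 hjlen]
      have := hnn _ (List.getElem_mem hjlen)
      omega
    · rw [if_neg h0, List.getD_eq_getElem rp 0 hjlen,
        List.getD_eq_getElem rp 0 (by omega : j - 1 < rp.length)]
      have := List.pairwise_iff_getElem.mp hrs (j - 1) j (by omega) (by omega) (by omega)
      omega
  have hmono := fillCost_mono rp (fs.length - l) (t - num) fs.length hd hnn'
  obtain ⟨hJ0, hJidx, hJfill, hJnext⟩ :=
    bsearch_props rp (fs.length - l) (t - num) cost fs.length 0 fs.length (by omega) (by omega)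
      (by rw [fillCost_zero]; exact hcost)
  obtain ⟨hb1, hb2, hb3⟩ := PySem.List.bisectRight_spec rp cost hrs
  have huniq : ∀ JA : Nat, JA ≤ fs.length → fillCost rp (fs.length - l) (t - num) JA ≤ cost →
      (JA < fs.length → cost < fillCost rp (fs.length - l) (t - num) (JA + 1)) →
      bsearch rp (fs.length - l) (t - num) cost 0 fs.length = JA := by
    intro JA h1 h2 h3
    exact flip_unique (fillCost rp (fs.length - l) (t - num)) cost fs.length hmono
      _ JA hJidx h1 hJfill hJnext h2 h3
  by_cases hl : l < fs.length
  · -- k0 ≥ 1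
    have hk01 : 1 ≤ fs.length - l := by omega
    by_cases hrr : min (fs.length - l) (PySem.List.bisectRight rp cost) = 0
    · -- r = 0: nothing completable, gain = partial * num
      have hbR0 : PySem.List.bisectRight rp cost = 0 := by omega
      have hrp0 : cost < rp.getD 0 0 := by
        rw [List.getD_eq_getElem rp 0 (by omega)]
        exact hb3 0 (by omega) (by omega)
      have hJ : bsearch rp (fs.length - l) (t - num) cost 0 fs.length = 0 := by
        apply huniq 0 (by omega) (by rw [fillCost_zero]; exact hcost)
        intro _
        rw [fillCost_eq_left rp _ _ 1 (by omega) (by omega)]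
        exact hrp0
      simp only [calcA, if_pos hl, if_pos hrr, hJ]
      rw [if_neg (by omega : ¬ (0 : Nat) = fs.length)]
      push_cast
      ring
    · -- r ≥ 1
      have hrr1 : 1 ≤ min (fs.length - l) (PySem.List.bisectRight rp cost) := by omega
      have hrrle : min (fs.length - l) (PySem.List.bisectRight rp cost)
          ≤ PySem.List.bisectRight rp cost := by omega
      have hgetle : rp.getD (min (fs.length - l) (PySem.List.bisectRight rp cost) - 1) 0 ≤ cost := by
        rw [List.getD_eq_getElem rp 0 (by omega : _ - 1 < rp.length)]
        exact hb2 _ (by omega) (by omega)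
      have hcost' : 0 ≤ cost - rp.getD (min (fs.length - l) (PySem.List.bisectRight rp cost) - 1) 0 := by
        omega
      by_cases hbk : PySem.List.bisectRight rp cost < fs.length - l
      · -- r = bisect value, strictly inside the direct piece: the floordiv correction is 0
        have hm : min (fs.length - l) (PySem.List.bisectRight rp cost)
            = PySem.List.bisectRight rp cost := by omega
        have hcostlt : cost < rp.getD (PySem.List.bisectRight rp cost) 0 := by
          rw [List.getD_eq_getElem rp 0 (by omega)]
          exact hb3 _ (by omega) (le_refl _)
        have hincb := hinc (PySem.List.bisectRight rp cost) hbk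
        rw [if_neg (by omega : ¬ PySem.List.bisectRight rp cost = 0)] at hincb
        have he : PySem.Int.floordiv
            (cost - rp.getD (min (fs.length - l) (PySem.List.bisectRight rp cost) - 1) 0)
            (t - num) = 0 := by
          rw [PySem.Int.floordiv_eq_iff_of_pos hd0]
          rw [hm] at hcost' ⊢
          constructor
          · omega
          · omega

        have hJ : bsearch rp (fs.length - l) (t - num) cost 0 fs.length
            = PySem.List.bisectRight rp cost := by
          apply huniq _ (by omega)
          · rw [fillCost_eq_left rp _ _ _ (by omega) (by omega), ← hm]
            exact hgetle
          · intro _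
            rw [fillCost_eq_left rp _ _ _ (by omega) (by omega)]
            simpa using hcostlt
        simp only [calcA, if_pos hl, if_neg hrr, he, hJ]
        rw [if_neg (by
              rw [hm]
              omega : ¬ ((min (fs.length - l) (PySem.List.bisectRight rp cost) : Nat) : Int) + 0
                ≥ (fs.length : Int))]
        rw [if_neg (by omega : ¬ PySem.List.bisectRight rp cost = fs.length)]
        rw [hm]
        ring
      · -- r = k0: direct piece exhausted, then cost/(t-num) extra gardens from level num
        have hm : min (fs.length - l) (PySem.List.bisectRight rp cost) = fs.length - l := by omega
        rw [hm] at hgetle hcost'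
        by_cases hge : ((fs.length - l : Nat) : Int)
            + PySem.Int.floordiv (cost - rp.getD (fs.length - l - 1) 0) (t - num)
            ≥ (fs.length : Int)
        · -- everything completable
          have hld : ((l : Nat) : Int) * (t - num) ≤ cost - rp.getD (fs.length - l - 1) 0 := by
            have := (PySem.Int.le_floordiv_iff_mul_le hd0
              (a := cost - rp.getD (fs.length - l - 1) 0) (q := (l : Int))).mp
            apply this
            omega
          have hJ : bsearch rp (fs.length - l) (t - num) cost 0 fs.length = fs.length := by
            apply huniq _ (le_refl _)
            · rw [fillCost_eq_right rp _ _ _ hk01 (by omega)]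
              have hcoef : ((fs.length : Int) - ((fs.length - l : Nat) : Int)) = (l : Int) := by
                omega
              rw [hcoef]
              omega
            · intro h
              omega
          simp only [calcA, if_pos hl, hm, hJ, if_pos hge]
          rw [if_neg (by omega : ¬ fs.length - l = 0)]
          simp
        · -- partially completable: the flip point is k0 + extra
          have he0 : 0 ≤ PySem.Int.floordiv (cost - rp.getD (fs.length - l - 1) 0) (t - num) := by
            rw [PySem.Int.floordiv_eq_ediv_of_pos hd0]
            exact Int.ediv_nonneg hcost' (by omega)
          set e := PySem.Int.floordiv (cost - rp.getD (fs.length - l - 1) 0) (t - num) with hedef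
          have hel : e < (l : Int) := by
            omega
          have hJA : ((fs.length - l + e.toNat : Nat) : Int) = ((fs.length - l : Nat) : Int) + e := by
            push_cast
            omega
          have hJ : bsearch rp (fs.length - l) (t - num) cost 0 fs.length
              = fs.length - l + e.toNat := by
            apply huniq _ (by omega)
            · rw [fillCost_eq_right rp _ _ _ hk01 (by omega)]
              have hed : e * (t - num) ≤ cost - rp.getD (fs.length - l - 1) 0 :=
                (PySem.Int.le_floordiv_iff_mul_le hd0).mp (le_of_eq hedef)
              rw [hJA]
              have : ((fs.length - l : Nat) : Int) + e - ((fs.length - l : Nat) : Int) = e := by ring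
              rw [this]
              omega
            · intro _
              rw [fillCost_eq_right rp _ _ _ hk01 (by omega)]
              have hed : cost - rp.getD (fs.length - l - 1) 0 < (e + 1) * (t - num) :=
                (PySem.Int.floordiv_lt_iff_lt_mul hd0).mp (by omega)
              have : ((fs.length - l + e.toNat + 1 : Nat) : Int)
                  - ((fs.length - l : Nat) : Int) = e + 1 := by
                push_cast
                omega
              rw [this]
              omega
          simp only [calcA, if_pos hl, hm]
          rw [if_neg (by omega : ¬ fs.length - l = 0), ← hedef, if_neg hge, hJ]
          rw [if_neg (by omega : ¬ fs.length - l + e.toNat = fs.length), hJA]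
          ring
  · -- l = |fs|: every garden already raised to num costs t - num apiece
    have hleq : l = fs.length := by omega
    have hk00 : fs.length - l = 0 := by omega
    rw [hk00]
    rw [hk00] at huniq
    have hrn0 : 0 ≤ PySem.Int.floordiv cost (t - num) := by
      rw [PySem.Int.floordiv_eq_ediv_of_pos hd0]
      exact Int.ediv_nonneg hcost (by omega)
    by_cases hge : PySem.Int.floordiv cost (t - num) ≥ (fs.length : Int)
    · have hJ : bsearch rp 0 (t - num) cost 0 fs.length = fs.length := by
        apply huniq _ (le_refl _)
        · rw [fillCost_k0_zero]
          exact (PySem.Int.le_floordiv_iff_mul_le hd0).mp hge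
        · intro h
          omega
      simp only [calcA, if_neg hl, if_pos hge, hJ, if_true]
      rw [max_comm]
      ring_nf
    · have hJ : bsearch rp 0 (t - num) cost 0 fs.length
          = (PySem.Int.floordiv cost (t - num)).toNat := by
        apply huniq _ (by omega)
        · rw [fillCost_k0_zero, Int.toNat_of_nonneg hrn0]
          exact (PySem.Int.le_floordiv_iff_mul_le hd0).mp (le_refl _)
        · intro _
          rw [fillCost_k0_zero]
          have : (((PySem.Int.floordiv cost (t - num)).toNat + 1 : Nat) : Int)
              = PySem.Int.floordiv cost (t - num) + 1 := by
            push_cast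
            omega
          rw [this]
          exact (PySem.Int.floordiv_lt_iff_lt_mul hd0).mp (by omega)
      simp only [calcA, if_neg hl, if_neg hge, hJ]
      rw [if_neg (by omega : ¬ (PySem.Int.floordiv cost (t - num)).toNat = fs.length),
        Int.toNat_of_nonneg hrn0]
      ring

-- the main loop equivalence: A's stateful sweep = B's per-candidate binary searches
theorem loop_eq (fs rp : List Int) (idx : Nat) (nF t fu pa ans : Int)
    (hs : fs.Pairwise (· ≤ ·)) (hne : fs ≠ []) (hlen : fs.length = idx)
    (hrs : rp.Pairwise (· ≤ ·)) (hrlen : rp.length = idx) (hnn : ∀ x ∈ rp, 0 ≤ x)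
    (hinc : ∀ num : Int, num < t → ∀ j : Nat, j < idx - PySem.List.bisectRight fs num →
        rp.getD j 0 - (if j = 0 then 0 else rp.getD (j - 1) 0) < t - num) :
    ∀ (fuel : Nat) (num : Int) (l r : Nat) (res : Int),
      fs.headD 0 ≤ num →
      ((fuel : Int) ≤ t - num ∨ fuel = 0) →
      l ≤ PySem.List.bisectRight fs num →
      PySem.List.bisectRight rp (costFv fs nF num) ≤ r →
      r ≤ idx → ans ≤ res →
      loopA fs (pyAccum fs) rp nF t fu pa ans fuel num l r res
        = ans + loopB fs (pyAccum fs) rp idx nF t fu pa fuel num (res - ans) := by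
  intro fuel
  induction fuel with
  | zero =>
    intro num l r res _ _ _ _ _ _
    simp [loopA, loopB]
  | succ fuel ih =>
    intro num l r res hmem0 hft hl hr hr2 hres
    have hnumt : num < t := by
      rcases hft with h | h
      · push_cast at h; omega
      · omega
    have hcL : advanceL fs num l = PySem.List.bisectRight fs num :=
      advanceL_eq fs num hs _ l hl rfl
    simp only [loopA, loopB, hcL]
    set c := PySem.List.bisectRight fs num with hcdef
    set cost := nF - (c : Int) * num + (pyAccum fs).getD (c - 1) 0 with hcostdef
    have hcostF : cost = costFv fs nF num := by rw [hcostdef, hcdef]; rfl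
    by_cases hneg : cost < 0
    · simp only [if_pos hneg]
      ring
    · simp only [if_neg hneg]
      have hrEq : decreaseR rp cost r = PySem.List.bisectRight rp cost := by
        apply decreaseR_eq rp cost hrs r
        · rw [hcostF]; exact hr
        · omega
      rw [hrEq]
      have hc1 : 1 ≤ c := bR_pos fs hs hne num hmem0
      have hcle : c ≤ idx := by
        have := (PySem.List.bisectRight_spec fs num hs).1; omega
      have hcalc := calc_eq_gain fs rp t fu pa num cost c hrs (by omega) hnn hc1 (by omega)
        (by omega) (by omega)
        (by intro j hj
            have := hinc num hnumt j (by omega)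
            exact this)
      rw [hlen] at hcalc
      rw [hcalc]
      set g := (if bsearch rp (idx - c) (t - num) cost 0 idx = idx
         then max ((idx : Int) * fu) (((idx : Int) - 1) * fu + pa * num)
         else pa * num + ((bsearch rp (idx - c) (t - num) cost 0 idx : Nat) : Int) * fu) with hgdef
      rw [upd_eq ans res g hres]
      have hrle : PySem.List.bisectRight rp cost ≤ idx := by
        have := (PySem.List.bisectRight_spec rp cost hrs).1; omega
      have hrec := ih (num + 1) c (PySem.List.bisectRight rp cost) (max res (ans + g))
        (by omega)
        (by rcases hft with h | h
            · left; push_cast at h ⊢; omega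
            · omega)
        (by rw [hcdef]; exact bR_mono fs hs (by omega : num ≤ num + 1))
        (by rw [hcostF]
            exact bR_mono rp hrs (costFv_anti fs hs hne nF hmem0 (by omega : num ≤ num + 1)))
        hrle (le_trans hres (le_max_left _ _))
      rw [hrec]
      have : max res (ans + g) - ans = max (res - ans) g := by omega
      rw [this]

theorem main_eq (flowers : List Int) (nF t fu pa : Int) :
    maximumBeauty flowers nF t fu pa = maximumBeauty_alt flowers nF t fu pa := by
  simp only [maximumBeauty, maximumBeauty_alt]
  have hsfl : (PySem.List.sorted flowers (fun x => x)).Pairwise (· ≤ ·) :=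
    PySem.List.sorted_pairwise flowers (fun x => x)
  set fl := PySem.List.sorted flowers (fun x => x) with hfl
  by_cases h0 : PySem.List.bisectLeft fl t = 0
  · simp [h0]
  · simp only [if_neg h0]
    obtain ⟨hL1, hL2, hL3⟩ := PySem.List.bisectLeft_spec fl t hsfl
    set idx := PySem.List.bisectLeft fl t with hidx
    set fs := fl.take idx with hfs
    have hlen : fs.length = idx := by
      rw [hfs, List.length_take]; omega
    have hne : fs ≠ [] := by
      intro h
      rw [h] at hlen
      simp at hlen
      omega
    have hsfs : fs.Pairwise (· ≤ ·) := hsfl.sublist (List.take_sublist idx fl)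
    have hlt : ∀ x ∈ fs, x < t := by
      intro x hx
      obtain ⟨i, hi, rfl⟩ := List.getElem_of_mem hx
      have hi' : i < idx := by
        have := hi; rw [hlen] at this; omega
      have hilen : i < fl.length := by omega
      have hgt : fs[i] = fl[i] := List.getElem_take
      rw [hgt]
      exact hL2 i hilen hi'
    set rev := (fs.map (fun x => t - x)).reverse with hrev
    have hrevlen : rev.length = idx := by
      rw [hrev, List.length_reverse, List.length_map, hlen]
    have hrevmem : ∀ x ∈ rev, 0 < x := by
      intro x hx
      rw [hrev, List.mem_reverse] at hx
      obtain ⟨y, hy, rfl⟩ := List.mem_map.mp hx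
      have := hlt y hy
      omega
    set rp := pyAccum rev with hrp
    have hrlen : rp.length = idx := by
      rw [hrp, length_pyAccum, hrevlen]
    have hrs : rp.Pairwise (· ≤ ·) := by
      rw [hrp]
      apply pyAccum_pairwise
      intro y hy
      have := hrevmem y hy
      omega
    have hnn : ∀ x ∈ rp, 0 ≤ x := by
      intro x hx
      rw [hrp] at hx
      apply pyAccumFrom_le rev _ 0 x hx
      intro z hz
      have := hrevmem z hz
      omega
    have hinc : ∀ num : Int, num < t → ∀ j : Nat, j < idx - PySem.List.bisectRight fs num →
        rp.getD j 0 - (if j = 0 then 0 else rp.getD (j - 1) 0) < t - num := by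
      intro num hnum j hj
      obtain ⟨hB1, hB2, hB3⟩ := PySem.List.bisectRight_spec fs num hsfs
      have hjr : j < rev.length := by omega
      have hstep : rp.getD j 0 - (if j = 0 then 0 else rp.getD (j - 1) 0) = rev.getD j 0 := by
        rw [hrp]
        exact pyAccum_inc rev j hjr
      rw [hstep]
      have hfb : num < fs.getD (fs.length - 1 - j) 0 := by
        rw [List.getD_eq_getElem fs 0 (by omega)]
        exact hB3 (fs.length - 1 - j) (by omega) (by omega)
      have hjm : j < ((fs.map (fun x => t - x)).reverse).length := by
        rw [← hrev]; omega
      have hrj : rev.getD j 0 = t - fs.getD (fs.length - 1 - j) 0 := by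
        rw [hrev, List.getD_eq_getElem _ 0 hjm, List.getElem_reverse, List.getElem_map,
          List.getD_eq_getElem fs 0 (by omega : fs.length - 1 - j < fs.length)]
        simp [List.length_map]
      rw [hrj]
      omega
    rw [min?_sorted_headD fs hsfs hne]
    have := loop_eq fs rp idx nF t fu pa (fu * ((fl.length : Int) - (idx : Int)))
      hsfs hne hlen hrs hrlen hnn hinc
      (t - fs.headD 0).toNat (fs.headD 0) 0 (PySem.List.bisectRight rp nF)
      (fu * ((fl.length : Int) - (idx : Int)))
      (le_refl _)
      (by omega)
      (Nat.zero_le _)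
      (bR_mono rp hrs (costFv_le fs hsfs hne nF (fs.headD 0) (le_refl _)))
      (by have := (PySem.List.bisectRight_spec rp nF hrs).1; omega)
      (le_refl _)
    rw [this, sub_self]

-- ===== VERDICT (by name: the statement is the Claim_ definition above) =====
theorem maximumBeauty_spec : Claim_equal_maximumBeauty := by
  intro flowers newFlowers target full partial_ _
  unfold Spec_maximumBeauty
  exact main_eq flowers newFlowers target full partial_
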